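-- pv_equiv track=rewrite | github.com/eyereasoner/eye | brains/branches/rational_root_theorem.py | eval_Q_times_qn
-- ===== SOURCE A (Python) =====
-- def eval_Q_times_qn(coeffs, p, q):
--     """
--     Compute q^n * f(p/q) as an integer:
--       If f(x) = sum_{i=0..n} a_i x^{n-i}, then
--       q^n f(p/q) = sum_{i=0..n} a_i * p^{n-i} * q^{i}.
--     """
--     n = len(coeffs) - 1
--     total = 0
--     # precompute powers (tiny degrees; straightforward loop)
--     pow_p = [1]*(n+1)
--     pow_q = [1]*(n+1)
--     for k in range(1, n+1):
--         pow_p[k] = pow_p[k-1]*p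
--         pow_q[k] = pow_q[k-1]*q
--     # a0 x^n + a1 x^{n-1} + ... + an
--     for i, ai in enumerate(coeffs):
--         # term index i corresponds to power x^{n-i}
--         total += ai * pow_p[n - i] * pow_q[i]
--     return total
-- ===== SOURCE B (Python) =====
-- def eval_Q_times_qn(coeffs, p, q):
--     """
--     Compute q^n * f(p/q) as an integer by Horner evaluation:
--     total = total*p + ai*qk accumulates sum a_i * p^(n-i) * q^i with no power tables.
--     """
--     total = 0
--     qk = 1
--     for ai in coeffs:
--         total = total * p + ai * qk
--         qk *= q
--     return total
-- ===== Notes on version B (the rewrite author's own statement) =====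
-- stated objective: faster
-- what changed: Replaced the precomputed power tables plus per-term triple big-int products with a single-pass integer Horner loop (total = total*p + ai*qk; qk *= q), removing both auxiliary lists.
import Mathlib
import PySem

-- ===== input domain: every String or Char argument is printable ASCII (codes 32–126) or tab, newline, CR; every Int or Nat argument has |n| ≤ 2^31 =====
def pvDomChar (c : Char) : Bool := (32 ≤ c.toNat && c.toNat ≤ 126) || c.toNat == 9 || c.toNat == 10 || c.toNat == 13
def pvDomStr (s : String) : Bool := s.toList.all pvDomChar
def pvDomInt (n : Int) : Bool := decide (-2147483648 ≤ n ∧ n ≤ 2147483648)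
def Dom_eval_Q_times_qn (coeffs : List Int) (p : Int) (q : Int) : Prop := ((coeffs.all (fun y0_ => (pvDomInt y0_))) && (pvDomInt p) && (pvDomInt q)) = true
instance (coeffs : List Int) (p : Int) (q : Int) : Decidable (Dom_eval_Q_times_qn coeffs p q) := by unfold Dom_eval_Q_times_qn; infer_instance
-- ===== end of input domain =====

-- B replaces A's two precomputed power tables and indexed sum by a one-pass Horner loop (simpler, O(1) extra space).

-- ===== PORT A =====
def eval_Q_times_qn (coeffs : List Int) (p : Int) (q : Int) : Int :=
  let n : Int := (coeffs.length : Int) - 1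
  -- pow_p = [1]*(n+1); pow_q = [1]*(n+1); the k-loop writes pow[k] = pow[k-1]*base in place
  let pows :=
    (PySem.List.pyRange 1 (n + 1) 1).foldl
      (fun st k =>
        (PySem.List.pySetD st.1 k (PySem.List.pyGetD st.1 (k - 1) 0 * p),
         PySem.List.pySetD st.2 k (PySem.List.pyGetD st.2 (k - 1) 0 * q)))
      (List.replicate (n + 1).toNat 1, List.replicate (n + 1).toNat 1)
  -- for i, ai in enumerate(coeffs): total += ai * pow_p[n-i] * pow_q[i]
  (PySem.List.enumerate coeffs 0).foldl
    (fun total ia =>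
      total + ia.2 * PySem.List.pyGetD pows.1 (n - ia.1) 0 * PySem.List.pyGetD pows.2 ia.1 0)
    0

-- ===== PORT B =====
def eval_Q_times_qn_alt (coeffs : List Int) (p : Int) (q : Int) : Int :=
  (coeffs.foldl (fun st ai => (st.1 * p + ai * st.2, st.2 * q)) ((0 : Int), (1 : Int))).1

-- ===== PRECONDITION & SPEC =====
def Spec_eval_Q_times_qn (coeffs : List Int) (p : Int) (q : Int) (out : Int) : Prop := out = eval_Q_times_qn_alt coeffs p q
instance (coeffs : List Int) (p : Int) (q : Int) (out : Int) : Decidable (Spec_eval_Q_times_qn coeffs p q out) := by unfold Spec_eval_Q_times_qn; infer_instance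

-- ===== CLAIM (what is proved, stated in full; the proofs are below) =====
def Claim_equal_eval_Q_times_qn : Prop := ∀ (coeffs : List Int) (p : Int) (q : Int), Dom_eval_Q_times_qn coeffs p q → Spec_eval_Q_times_qn coeffs p q (eval_Q_times_qn coeffs p q)

-- ===== LEMMAS AND PROOFS =====

-- the mathematical sum Σ_k cs[k] * r * q^k * p^(|cs|-1-k), shared characterisation of both ports
def pvS (p q : Int) : List Int → Int → Int
  | [], _ => 0
  | a :: cs, r => a * r * p ^ cs.length + pvS p q cs (r * q)

theorem pvS_cons (p q a r : Int) (cs : List Int) :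
    pvS p q (a :: cs) r = a * r * p ^ cs.length + pvS p q cs (r * q) := rfl

-- B's Horner fold computes pvS
theorem hornerB (p q : Int) :
    ∀ (cs : List Int) (t r : Int),
      cs.foldl (fun st ai => (st.1 * p + ai * st.2, st.2 * q)) (t, r)
        = (t * p ^ cs.length + pvS p q cs r, r * q ^ cs.length) := by
  intro cs
  induction cs with
  | nil => intro t r; simp [pvS]
  | cons a cs ih =>
    intro t r
    simp only [List.foldl_cons, ih, pvS_cons, List.length_cons]
    rw [Prod.mk.injEq]
    constructor <;> ring

-- the in-place fill loop turns the all-ones table into the power table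
theorem fill (b : Int) (m : Nat) :
    ∀ (d j : Nat), 1 ≤ j → j + d = m →
      (PySem.List.pyRange (j : Int) (m : Int) 1).foldl
          (fun l k => PySem.List.pySetD l k (PySem.List.pyGetD l (k - 1) 0 * b))
          ((List.range m).map (fun k => if k < j then b ^ k else 1))
        = (List.range m).map (fun k => b ^ k) := by
  intro d
  induction d with
  | zero =>
    intro j _ hjm
    rw [PySem.List.pyRange_one_eq_nil (by omega)]
    simp only [List.foldl_nil]
    apply List.map_congr_left
    intro k hk
    simp only [List.mem_range] at hk
    simp [show k < j by omega]
  | succ d ih =>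
    intro j hj hjm
    rw [PySem.List.pyRange_one_cons (by exact_mod_cast (by omega : j < m)), List.foldl_cons]
    have hidx : ((j : Int) - 1) = ((j - 1 : Nat) : Int) := by omega
    have hget : PySem.List.pyGetD ((List.range m).map (fun k => if k < j then b ^ k else 1)) ((j : Int) - 1) 0 = b ^ (j - 1) := by
      rw [hidx, PySem.List.pyGetD_natCast]
      have hlt : j - 1 < m := by omega
      simp [List.getD, hlt, show j - 1 < j by omega]
    have hset : PySem.List.pySetD ((List.range m).map (fun k => if k < j then b ^ k else 1)) (j : Int) (b ^ (j - 1) * b)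
        = (List.range m).map (fun k => if k < j + 1 then b ^ k else 1) := by
      rw [PySem.List.pySetD_natCast]
      apply List.ext_getElem
      · simp
      · intro i h1 h2
        simp only [List.getElem_set, List.getElem_map, List.getElem_range]
        by_cases hij : j = i
        · subst hij
          have : b ^ (j - 1) * b = b ^ j := by
            rw [← pow_succ]
            congr 1
            omega
          simp [this]
        · simp only [if_neg hij]
          by_cases hi : i < j
          · simp [hi, show i < j + 1 by omega]
          · simp [hi, show ¬ i < j + 1 by omega]
    rw [hget, hset]
    have : ((j : Int) + 1) = ((j + 1 : Nat) : Int) := by push_cast; ring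
    rw [this]
    exact ih (j + 1) (by omega) (by omega)

-- A's summation fold over enumerate, against the power tables, computes pvS
theorem AfoldSum (p q : Int) (m : Nat) :
    ∀ (cs : List Int) (j : Nat) (t : Int), j + cs.length = m →
      (PySem.List.enumerate cs (j : Int)).foldl
          (fun total ia =>
            total + ia.2 * PySem.List.pyGetD ((List.range m).map (fun k => p ^ k)) (((m : Int) - 1) - ia.1) 0
                  * PySem.List.pyGetD ((List.range m).map (fun k => q ^ k)) ia.1 0)
          t
        = t + pvS p q cs (q ^ j) := by
  intro cs
  induction cs with
  | nil => intro j t _; simp [PySem.List.enumerate_nil, pvS]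
  | cons a cs ih =>
    intro j t hm
    rw [PySem.List.enumerate_cons, List.foldl_cons]
    have hjm : j < m := by simp at hm; omega
    have hp : (((m : Int) - 1) - (j : Int)) = ((m - 1 - j : Nat) : Int) := by omega
    have hgp : PySem.List.pyGetD ((List.range m).map (fun k => p ^ k)) (((m : Int) - 1) - (j : Int)) 0 = p ^ (m - 1 - j) := by
      rw [hp, PySem.List.pyGetD_natCast]
      simp [List.getD, show m - 1 - j < m by omega]
    have hgq : PySem.List.pyGetD ((List.range m).map (fun k => q ^ k)) (j : Int) 0 = q ^ j := by
      rw [PySem.List.pyGetD_natCast]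
      simp [List.getD, hjm]
    have hcast : ((j : Int) + 1) = ((j + 1 : Nat) : Int) := by push_cast; ring
    rw [hgp, hgq, hcast, ih (j + 1) _ (by simp at hm ⊢; omega)]
    rw [pvS_cons]
    have hlen : m - 1 - j = cs.length := by simp at hm; omega
    rw [hlen, pow_succ]
    ring

theorem AfoldSum0 (p q : Int) (m : Nat) (cs : List Int) (h : cs.length = m) :
    (PySem.List.enumerate cs).foldl
        (fun total ia =>
          total + ia.2 * PySem.List.pyGetD ((List.range m).map (fun k => p ^ k)) (((m : Int) - 1) - ia.1) 0
                * PySem.List.pyGetD ((List.range m).map (fun k => q ^ k)) ia.1 0)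
        0
      = pvS p q cs 1 := by
  have h0 := AfoldSum p q m cs 0 0 (by omega)
  simpa using h0

theorem replicate_eq_map (m : Nat) (b : Int) :
    List.replicate m (1 : Int) = (List.range m).map (fun k => if k < 1 then b ^ k else 1) := by
  apply List.ext_getElem
  · simp
  · intro i h1 h2
    simp only [List.getElem_replicate, List.getElem_map, List.getElem_range]
    by_cases hi : i < 1
    · interval_cases i; simp
    · simp [hi]

theorem fill' (b : Int) (m : Nat) (hm : 1 ≤ m) :
    (PySem.List.pyRange (1 : Int) (m : Int) 1).foldl
        (fun l k => PySem.List.pySetD l k (PySem.List.pyGetD l (k - 1) 0 * b))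
        (List.replicate m 1)
      = (List.range m).map (fun k => b ^ k) := by
  rw [replicate_eq_map m b]
  have h := fill b m (m - 1) 1 (by omega) (by omega)
  simpa using h

-- ===== VERDICT (by name: the statement is the Claim_ definition above) =====
theorem eval_Q_times_qn_spec : Claim_equal_eval_Q_times_qn := by
  intro coeffs p q _
  unfold Spec_eval_Q_times_qn eval_Q_times_qn eval_Q_times_qn_alt
  cases coeffs with
  | nil =>
    simp [PySem.List.enumerate_nil]
  | cons a cs =>
    simp only []
    set m : Nat := (a :: cs).length with hmdef
    have hm1 : 1 ≤ m := by simp [hmdef]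
    have hn : ((a :: cs).length : Int) - 1 + 1 = (m : Int) := by simp [hmdef]
    rw [hn]
    have htn : ((m : Int)).toNat = m := by omega
    rw [htn]
    rw [PySem.List.foldl_prod_mk
      (f := fun l k => PySem.List.pySetD l k (PySem.List.pyGetD l (k - 1) 0 * p))
      (g := fun l k => PySem.List.pySetD l k (PySem.List.pyGetD l (k - 1) 0 * q))]
    rw [fill' p m hm1, fill' q m hm1]
    rw [AfoldSum0 p q m (a :: cs) hmdef.symm]
    rw [hornerB p q (a :: cs) 0 1]
    simp
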